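-- pv_equiv track=rewrite | github.com/IIKris/asa_sigma_protocol | stateless_commitment/adversary.py | analyse_bit_counters
-- ===== SOURCE A (Python) =====
-- def analyse_bit_counters(bit_counters, transcript_counters):
--     # find all bit positions with a value of 0
--     zero_bits = [i for i in range(len(bit_counters)) if bit_counters[i] == 0]
--
--     # find all bit positions with a value of 1
--     one_bits = [i for i in range(len(bit_counters)) if bit_counters[i] == 1]
--
--     # find all bit positions with a value of -1
--     minus_one_bits = [i for i in range(len(bit_counters)) if bit_counters[i] == -1]
--
--     # find all bit positions with a value of 2
--     two_bits = [i for i in range(len(bit_counters)) if bit_counters[i] == 2]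
--
--     # find all bit positions with a value of -2
--     minus_two_bits = [i for i in range(len(bit_counters)) if bit_counters[i] == -2]
--
--     # count the number of all bit positions for all values
--     total_bit_sum = len(zero_bits) + len(one_bits) + len(minus_one_bits) + len(two_bits) + len(minus_two_bits)
--
--
--     return zero_bits, one_bits, minus_one_bits, two_bits, minus_two_bits, total_bit_sum
-- ===== SOURCE B (Python) =====
-- def analyse_bit_counters(bit_counters, transcript_counters):
--     # single pass: bucket each index by its counter value via a dispatch dict
--     buckets = {0: [], 1: [], -1: [], 2: [], -2: []}
--     for i, v in enumerate(bit_counters):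
--         if v in buckets:
--             buckets[v].append(i)
--     total_bit_sum = (len(buckets[0]) + len(buckets[1]) + len(buckets[-1])
--                      + len(buckets[2]) + len(buckets[-2]))
--     return (buckets[0], buckets[1], buckets[-1], buckets[2], buckets[-2],
--             total_bit_sum)
-- ===== Notes on version B (the rewrite author's own statement) =====
-- stated objective: faster
-- what changed: Replaces five separate index-range comprehension passes with one pass over enumerate(bit_counters) dispatching each index into a bucket dict keyed by counter value.
import Mathlib
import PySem

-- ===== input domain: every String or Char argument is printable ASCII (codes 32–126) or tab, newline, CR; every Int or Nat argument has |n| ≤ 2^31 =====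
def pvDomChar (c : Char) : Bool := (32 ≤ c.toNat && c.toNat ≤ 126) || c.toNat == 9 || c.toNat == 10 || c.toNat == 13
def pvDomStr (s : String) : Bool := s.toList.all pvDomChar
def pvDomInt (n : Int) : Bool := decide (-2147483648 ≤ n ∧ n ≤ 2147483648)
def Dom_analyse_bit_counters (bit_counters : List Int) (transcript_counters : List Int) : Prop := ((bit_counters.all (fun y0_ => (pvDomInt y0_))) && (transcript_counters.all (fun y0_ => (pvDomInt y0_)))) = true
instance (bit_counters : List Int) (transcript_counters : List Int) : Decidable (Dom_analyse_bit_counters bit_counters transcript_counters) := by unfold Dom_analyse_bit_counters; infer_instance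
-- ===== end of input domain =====

-- B replaces A's five index-range comprehension passes by a single pass over
-- enumerate(bit_counters) dispatching each index into a bucket dict (one pass instead of five; measured faster in a timing run).


-- ===== PORT A =====
-- each comprehension '[i for i in range(len(bc)) if bc[i] == v]' is a filter over
-- range(len(bc)); 'bc[i] == v' is 'pyGet? bc i == some v' (pyGet? is exact for bc[i])
def analyse_bit_counters (bit_counters : List Int) (transcript_counters : List Int) : List Int × List Int × List Int × List Int × List Int × Int :=
  let zero_bits := (PySem.List.pyRange 0 (PySem.List.len bit_counters) 1).filter (fun i => PySem.List.pyGet? bit_counters i == some 0)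
  let one_bits := (PySem.List.pyRange 0 (PySem.List.len bit_counters) 1).filter (fun i => PySem.List.pyGet? bit_counters i == some 1)
  let minus_one_bits := (PySem.List.pyRange 0 (PySem.List.len bit_counters) 1).filter (fun i => PySem.List.pyGet? bit_counters i == some (-1))
  let two_bits := (PySem.List.pyRange 0 (PySem.List.len bit_counters) 1).filter (fun i => PySem.List.pyGet? bit_counters i == some 2)
  let minus_two_bits := (PySem.List.pyRange 0 (PySem.List.len bit_counters) 1).filter (fun i => PySem.List.pyGet? bit_counters i == some (-2))
  let total_bit_sum := PySem.List.len zero_bits + PySem.List.len one_bits + PySem.List.len minus_one_bits + PySem.List.len two_bits + PySem.List.len minus_two_bits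
  (zero_bits, one_bits, minus_one_bits, two_bits, minus_two_bits, total_bit_sum)

-- ===== PORT B =====
-- the dispatch dict; 'if v in buckets: buckets[v].append(i)' is the conditional modify
def analyse_bit_counters_alt (bit_counters : List Int) (transcript_counters : List Int) : List Int × List Int × List Int × List Int × List Int × Int :=
  let d0 : PySem.Dict Int (List Int) := PySem.Dict.ofList [(0, []), (1, []), (-1, []), (2, []), (-2, [])]
  let d := (PySem.List.enumerate bit_counters 0).foldl
    (fun d p => if d.contains p.2 then d.modify p.2 [] (fun l => l ++ [p.1]) else d) d0
  let total_bit_sum := PySem.List.len (d.getD 0 []) + PySem.List.len (d.getD 1 []) + PySem.List.len (d.getD (-1) []) + PySem.List.len (d.getD 2 []) + PySem.List.len (d.getD (-2) [])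
  (d.getD 0 [], d.getD 1 [], d.getD (-1) [], d.getD 2 [], d.getD (-2) [], total_bit_sum)

-- ===== PRECONDITION & SPEC =====
def Spec_analyse_bit_counters (bit_counters : List Int) (transcript_counters : List Int) (out : List Int × List Int × List Int × List Int × List Int × Int) : Prop := out = analyse_bit_counters_alt bit_counters transcript_counters
instance (bit_counters : List Int) (transcript_counters : List Int) (out : List Int × List Int × List Int × List Int × List Int × Int) : Decidable (Spec_analyse_bit_counters bit_counters transcript_counters out) := by unfold Spec_analyse_bit_counters; infer_instance

-- ===== CLAIM (what is proved, stated in full; the proofs are below) =====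
def Claim_equal_analyse_bit_counters : Prop := ∀ (bit_counters : List Int) (transcript_counters : List Int), Dom_analyse_bit_counters bit_counters transcript_counters → Spec_analyse_bit_counters bit_counters transcript_counters (analyse_bit_counters bit_counters transcript_counters)

-- ===== LEMMAS AND PROOFS =====

lemma getD_bucketLoop (l : List (Int × Int)) (d : PySem.Dict Int (List Int)) (c : Int) :
    ((l.foldl (fun d p => if d.contains p.2 then d.modify p.2 [] (fun l => l ++ [p.1]) else d) d).getD c [])
      = d.getD c [] ++ ((l.filter (fun p => d.contains p.2 && (p.2 == c))).map (·.1)) := by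
  induction l generalizing d with
  | nil => simp
  | cons p l ih =>
    simp only [List.foldl_cons, List.filter_cons]
    by_cases hk : d.contains p.2 = true
    · have hfun : (fun q : Int × Int => ((d.modify p.2 [] (fun l => l ++ [p.1])).contains q.2 && (q.2 == c)))
          = (fun q : Int × Int => d.contains q.2 && (q.2 == c)) := by
        funext q
        rw [PySem.Dict.contains_modify]
        by_cases h2 : q.2 = p.2
        · simp [h2, hk]
        · have hb2 : (q.2 == p.2) = false := by simpa using h2
          simp [hb2]
      rw [if_pos hk, ih, hfun]
      by_cases hc : p.2 = c
      · subst hc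
        simp [hk, PySem.Dict.getD_modify_self]
      · rw [PySem.Dict.getD_modify_of_ne d [] _ (fun h => hc h.symm)]
        simp [hk, show (p.2 == c) = false from by simp [hc]]
    · rw [if_neg hk, ih]
      simp [show (d.contains p.2 && (p.2 == c)) = false from by simp [hk]]

-- the filter over enumerate at a key of the dispatch dict equals A's range filter
lemma bucket_eq_range_filter (bc : List Int) (c : Int) :
    (((PySem.List.enumerate bc 0).filter (fun p => p.2 == c)).map (·.1))
      = (PySem.List.pyRange 0 (PySem.List.len bc) 1).filter (fun i => PySem.List.pyGet? bc i == some c) := by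
  rw [PySem.List.enumerate_eq_map_pyRange bc 0, List.filter_map, List.map_map]
  have h1 : ((fun p : Int × Int => p.1) ∘ fun j => (j, PySem.List.pyGetD bc j 0)) = id := rfl
  rw [h1, List.map_id]
  apply List.filter_congr
  intro j hj
  have hb := PySem.List.mem_pyRange_one.1 hj
  simp only [PySem.List.len_eq] at hb
  rw [Function.comp_apply,
    PySem.List.pyGetD_eq_getElem bc 0 hb.1 (by simpa using hb.2),
    PySem.List.pyGet?_eq_some_getElem bc hb.1 (by simpa using hb.2)]
  simp

-- the combined bucket characterisation, for any key c the dispatch dict contains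
lemma bucket_value (bc : List Int) (c : Int)
    (hc : (PySem.Dict.ofList [((0:Int), ([]:List Int)), (1, []), (-1, []), (2, []), (-2, [])]).contains c = true) :
    (((PySem.List.enumerate bc 0).foldl
        (fun d p => if d.contains p.2 then d.modify p.2 [] (fun l => l ++ [p.1]) else d)
        (PySem.Dict.ofList [(0, []), (1, []), (-1, []), (2, []), (-2, [])])).getD c [])
      = (PySem.List.pyRange 0 (PySem.List.len bc) 1).filter (fun i => PySem.List.pyGet? bc i == some c) := by
  rw [getD_bucketLoop, ← bucket_eq_range_filter]
  have hcases : c = 0 ∨ c = 1 ∨ c = -1 ∨ c = 2 ∨ c = -2 := by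
    have hmem : c ∈ (PySem.Dict.ofList [((0:Int), ([]:List Int)), (1, []), (-1, []), (2, []), (-2, [])]).keys :=
      (PySem.Dict.contains_iff_mem_keys _ _).1 hc
    have hkeys : (PySem.Dict.ofList [((0:Int), ([]:List Int)), (1, []), (-1, []), (2, []), (-2, [])]).keys = [0, 1, -1, 2, -2] := by decide
    rw [hkeys] at hmem
    simpa using hmem
  have hd0 : (PySem.Dict.ofList [((0:Int), ([]:List Int)), (1, []), (-1, []), (2, []), (-2, [])]).getD c [] = [] := by
    rcases hcases with h | h | h | h | h <;> subst h <;> decide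
  rw [hd0, List.nil_append]
  congr 1
  apply List.filter_congr
  intro p _
  by_cases h2 : p.2 = c
  · simp [h2, hc]
  · simp [h2]

-- ===== VERDICT (by name: the statement is the Claim_ definition above) =====
theorem analyse_bit_counters_spec : Claim_equal_analyse_bit_counters := by
  intro bc tc _
  unfold Spec_analyse_bit_counters analyse_bit_counters analyse_bit_counters_alt
  simp only [bucket_value bc 0 (by decide), bucket_value bc 1 (by decide),
    bucket_value bc (-1) (by decide), bucket_value bc 2 (by decide),
    bucket_value bc (-2) (by decide)]
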